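-- pv_equiv track=rewrite | github.com/TomKite57/advent_of_code_2023 | day_13.py | get_segment_summary
-- ===== SOURCE A (Python) =====
-- from collections import defaultdict
--
-- def get_segment_summary(segment):
--     rows, cols = defaultdict(set), defaultdict(set)
--
--     for y, row in enumerate(segment):
--         for x, char in enumerate(row):
--             if char == '#':
--                 rows[y].add(x)
--                 cols[x].add(y)
--
--     return rows, cols
-- ===== SOURCE B (Python) =====
-- from collections import defaultdict
--
-- def get_segment_summary(segment):
--     pts = [(y, x)
--            for y, row in enumerate(segment)
--            for x, char in enumerate(row) if char == '#']
--     rows = defaultdict(set)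
--     for y in dict.fromkeys(y for y, _ in pts):
--         rows[y] = {x for y2, x in pts if y2 == y}
--     cols = defaultdict(set)
--     for x in dict.fromkeys(x for _, x in pts):
--         cols[x] = {y for y, x2 in pts if x2 == x}
--     return rows, cols
-- ===== Notes on version B (the rewrite author's own statement) =====
-- stated objective: alternative
-- what changed: B flattens the grid into one list of (y,x) '#'-coordinates, then builds each summary by deduplicating the keys in first-occurrence order (dict.fromkeys) and computing every bucket with a filtering set comprehension over the point list, instead of A's single scan that incrementally updates both defaultdicts per character.
import Mathlib
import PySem

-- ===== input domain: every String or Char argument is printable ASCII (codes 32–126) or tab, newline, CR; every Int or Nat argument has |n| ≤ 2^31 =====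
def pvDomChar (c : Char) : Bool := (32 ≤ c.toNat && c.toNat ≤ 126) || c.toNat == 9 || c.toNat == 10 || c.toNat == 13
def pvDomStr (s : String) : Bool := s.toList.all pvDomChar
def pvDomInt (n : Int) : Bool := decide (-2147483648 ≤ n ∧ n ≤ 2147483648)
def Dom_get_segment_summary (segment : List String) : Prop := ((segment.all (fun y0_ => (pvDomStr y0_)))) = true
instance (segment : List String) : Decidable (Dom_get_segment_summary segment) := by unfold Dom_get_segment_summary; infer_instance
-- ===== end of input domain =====

-- B flattens the grid into one (y,x) '#'-coordinate list and groups it by repeated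
-- filtering over first-occurrence-deduplicated keys (objective: alternative algorithm, same result).

-- defaultdict(set): d[k].add(v)

def pvDAdd (d : PySem.Dict Int (PySem.Set Int)) (k v : Int) : PySem.Dict Int (PySem.Set Int) :=
  d.insert k (PySem.Set.add (d.getD k PySem.Set.empty) v)

-- ===== PORT A =====
def get_segment_summary (segment : List String) : (List (Int × List Int)) × (List (Int × List Int)) :=
  let st := (PySem.List.enumerate segment).foldl
    (fun st p => (PySem.List.enumerate p.2.toList).foldl
      (fun st q => if q.2 == '#' then (pvDAdd st.1 p.1 q.1, pvDAdd st.2 q.1 p.1) else st) st)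
    (PySem.Dict.empty, PySem.Dict.empty)
  (st.1.items, st.2.items)

-- ===== PORT B =====
def get_segment_summary_alt (segment : List String) : (List (Int × List Int)) × (List (Int × List Int)) :=
  let pts := (PySem.List.enumerate segment).flatMap
    (fun p => ((PySem.List.enumerate p.2.toList).filter (fun q => q.2 == '#')).map (fun q => (p.1, q.1)))
  let rows := (PySem.List.dedup (pts.map (·.1))).foldl
    (fun d y => d.insert y (PySem.Set.ofList ((pts.filter (fun p => p.1 == y)).map (·.2))))
    PySem.Dict.empty
  let cols := (PySem.List.dedup (pts.map (·.2))).foldl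
    (fun d x => d.insert x (PySem.Set.ofList ((pts.filter (fun p => p.2 == x)).map (·.1))))
    PySem.Dict.empty
  (rows.items, cols.items)

-- ===== PRECONDITION & SPEC =====
def Spec_get_segment_summary (segment : List String) (out : (List (Int × List Int)) × (List (Int × List Int))) : Prop := out = get_segment_summary_alt segment
instance (segment : List String) (out : (List (Int × List Int)) × (List (Int × List Int))) : Decidable (Spec_get_segment_summary segment out) := by unfold Spec_get_segment_summary; infer_instance

-- ===== CLAIM (what is proved, stated in full; the proofs are below) =====
def Claim_equal_get_segment_summary : Prop := ∀ (segment : List String), Dom_get_segment_summary segment → Spec_get_segment_summary segment (get_segment_summary segment)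

-- ===== LEMMAS AND PROOFS =====

-- B's per-dict build: dedup'd keys, each paired with its filtered bucket
def pvBuild (l : List (Int × Int)) : PySem.Dict Int (PySem.Set Int) :=
  (PySem.List.dedup (l.map (·.1))).foldl
    (fun d k => d.insert k (PySem.Set.ofList ((l.filter (fun p => p.1 == k)).map (·.2))))
    PySem.Dict.empty

-- a fold over a pair state whose branches act componentwise splits into two folds
theorem pvFoldlProdIte {α β γ : Type} (l : List α) (P : α → Bool) (f : β → α → β)
    (g : γ → α → γ) (b : β) (c : γ) :
    l.foldl (fun st e => if P e then (f st.1 e, g st.2 e) else st) (b, c)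
      = (l.foldl (fun b e => if P e then f b e else b) b,
         l.foldl (fun c e => if P e then g c e else c) c) := by
  induction l generalizing b c with
  | nil => rfl
  | cons x xs ih => by_cases h : P x <;> simp [h, ih]

theorem pvFoldlProd {α β γ : Type} (l : List α) (F : β → α → β) (G : γ → α → γ) (b : β) (c : γ) :
    l.foldl (fun st e => (F st.1 e, G st.2 e)) (b, c) = (l.foldl F b, l.foldl G c) := by
  induction l generalizing b c with
  | nil => rfl
  | cons x xs ih => simp [ih]

-- a guarded fold is the fold over the filtered, projected list
theorem pvFoldlIteFilterMap {α β γ : Type} (l : List α) (P : α → Bool) (h : α → γ)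
    (f : β → γ → β) (b : β) :
    l.foldl (fun a q => if P q then f a (h q) else a) b
      = ((l.filter P).map h).foldl f b := by
  induction l generalizing b with
  | nil => rfl
  | cons x xs ih => by_cases hp : P x <;> simp [hp, ih]


theorem pvDedupSnoc (xs : List Int) (k : Int) :
    PySem.List.dedup (xs ++ [k])
      = if k ∈ xs then PySem.List.dedup xs else PySem.List.dedup xs ++ [k] := by
  simp only [PySem.List.dedup_eq_ofList, PySem.Set.ofList_append_singleton, PySem.Set.add]
  by_cases h : k ∈ xs <;> simp [PySem.Set.contains, PySem.Set.mem_ofList, h]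

theorem pvItemsFold (l : List (Int × Int)) :
    (l.foldl (fun d p => pvDAdd d p.1 p.2) PySem.Dict.empty).items
      = (PySem.List.dedup (l.map (·.1))).map
          (fun k => (k, PySem.Set.ofList ((l.filter (fun p => p.1 == k)).map (·.2)))) := by
  induction l using List.reverseRecOn with
  | nil => rfl
  | append_singleton l p ih =>
    rw [List.foldl_append, List.foldl_cons, List.foldl_nil]
    have hkeys : (l.foldl (fun d p => pvDAdd d p.1 p.2) PySem.Dict.empty).keys
        = PySem.List.dedup (l.map (·.1)) := by
      simp only [PySem.Dict.keys, ih, List.map_map]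
      rw [show ((fun (x : Int × PySem.Set Int) => x.1) ∘ fun k =>
        (k, PySem.Set.ofList ((l.filter (fun p => p.1 == k)).map (·.2)))) = id from rfl,
        List.map_id, PySem.List.dedup_eq_ofList]
    have hnodup : (l.foldl (fun d p => pvDAdd d p.1 p.2) PySem.Dict.empty).keys.Nodup := by
      rw [hkeys]; exact PySem.List.nodup_dedup _
    have hcont : (l.foldl (fun d p => pvDAdd d p.1 p.2) PySem.Dict.empty).contains p.1
        = decide (p.1 ∈ l.map (·.1)) := by
      rw [PySem.Dict.contains_eq_decide_mem_keys, hkeys]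
      simp [PySem.List.dedup_eq_ofList, PySem.Set.mem_ofList]
    simp only [List.map_append, List.map_cons, List.map_nil, List.filter_append, pvDedupSnoc]
    by_cases hmem : p.1 ∈ l.map (·.1)
    · rw [if_pos hmem]
      have hb : ((p.1, PySem.Set.ofList ((l.filter (fun q => q.1 == p.1)).map (·.2)))
          ∈ (l.foldl (fun d p => pvDAdd d p.1 p.2) PySem.Dict.empty).items) := by
        rw [ih]
        exact List.mem_map_of_mem (by
          simp [PySem.List.dedup_eq_ofList, PySem.Set.mem_ofList, hmem])
      have hgetD : (l.foldl (fun d p => pvDAdd d p.1 p.2) PySem.Dict.empty).getD p.1 PySem.Set.empty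
          = PySem.Set.ofList ((l.filter (fun q => q.1 == p.1)).map (·.2)) :=
        PySem.Dict.getD_of_mem_items _ hb hnodup _
      rw [pvDAdd, hgetD, PySem.Dict.items_insert_of_contains _ _ (by rw [hcont]; simp [hmem]), ih,
        List.map_map]
      apply List.map_congr_left
      intro k hk
      by_cases hkp : k = p.1
      · subst hkp
        simp [List.filter, PySem.Set.ofList_append_singleton]
      · simp only [Function.comp_apply]
        rw [if_neg (by simpa using hkp)]
        have hf : (List.filter (fun q => q.1 == k) [p]) = [] := by
          simp [List.filter_cons]
          intro h; exact absurd h.symm hkp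
        simp [hf]
    · rw [if_neg hmem]
      have hgetD : (l.foldl (fun d p => pvDAdd d p.1 p.2) PySem.Dict.empty).getD p.1 PySem.Set.empty
          = PySem.Set.empty :=
        PySem.Dict.getD_of_not_contains _ _ (by rw [hcont]; simp [hmem])
      rw [pvDAdd, hgetD, PySem.Dict.items_insert_of_not_contains _ _ (by rw [hcont]; simp [hmem]),
        ih, List.map_append]
      congr 1
      · apply List.map_congr_left
        intro k hk
        have hkne : ¬ (p.1 = k) := by
          intro h; subst h
          exact hmem (by
            simpa [PySem.List.dedup_eq_ofList, PySem.Set.mem_ofList] using hk)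
        have hf : (List.filter (fun q => q.1 == k) [p]) = [] := by
          simp [List.filter_cons]
          exact hkne
        simp [hf]
      · have hf : (List.filter (fun q => q.1 == p.1) [p]) = [p] := by simp
        have hfl : (List.filter (fun q => q.1 == p.1) l) = [] := by
          rw [List.filter_eq_nil_iff]
          intro a ha
          simp only [beq_iff_eq]
          intro h
          exact hmem (h ▸ List.mem_map_of_mem ha)
        simp [hf, hfl, PySem.Set.add, PySem.Set.empty, PySem.Set.contains, PySem.Set.ofList]

-- A's defaultdict-accumulation dict IS B's dedup-and-filter build
theorem pvFoldEqBuild (l : List (Int × Int)) :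
    l.foldl (fun d p => pvDAdd d p.1 p.2) PySem.Dict.empty = pvBuild l := by
  apply PySem.Dict.ext
  rw [pvItemsFold, pvBuild,
    PySem.Dict.items_foldl_insert_fresh (PySem.List.dedup (l.map (·.1))) (fun k => k)
      (fun k => PySem.Set.ofList ((l.filter (fun p => p.1 == k)).map (·.2)))
      PySem.Dict.empty (fun _ _ => rfl)
      (by rw [List.map_id']; exact PySem.List.nodup_dedup _)]
  rfl

-- ===== VERDICT (by name: the statement is the Claim_ definition above) =====
theorem get_segment_summary_spec : Claim_equal_get_segment_summary := by
  intro segment _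
  unfold Spec_get_segment_summary get_segment_summary get_segment_summary_alt
  set pts := (PySem.List.enumerate segment).flatMap
    (fun p => ((PySem.List.enumerate p.2.toList).filter (fun q => q.2 == '#')).map
      (fun q => (p.1, q.1))) with hpts
  have split1 : ∀ (st : PySem.Dict Int (PySem.Set Int) × PySem.Dict Int (PySem.Set Int))
      (p : Int × String),
      (PySem.List.enumerate p.2.toList).foldl
        (fun st q => if q.2 == '#' then (pvDAdd st.1 p.1 q.1, pvDAdd st.2 q.1 p.1) else st) st
      = ((PySem.List.enumerate p.2.toList).foldl
            (fun r q => if q.2 == '#' then pvDAdd r p.1 q.1 else r) st.1,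
         (PySem.List.enumerate p.2.toList).foldl
            (fun c q => if q.2 == '#' then pvDAdd c q.1 p.1 else c) st.2) := by
    intro st p
    rw [← Prod.mk.eta (p := st)]
    exact pvFoldlProdIte (PySem.List.enumerate p.2.toList) (fun q => q.2 == '#')
      (fun b q => pvDAdd b p.1 q.1) (fun c q => pvDAdd c q.1 p.1) st.1 st.2
  have split2 :
      (PySem.List.enumerate segment).foldl
        (fun st p => (PySem.List.enumerate p.2.toList).foldl
          (fun st q => if q.2 == '#' then (pvDAdd st.1 p.1 q.1, pvDAdd st.2 q.1 p.1) else st) st)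
        (PySem.Dict.empty, PySem.Dict.empty)
      = ((PySem.List.enumerate segment).foldl
            (fun r p => (PySem.List.enumerate p.2.toList).foldl
              (fun r q => if q.2 == '#' then pvDAdd r p.1 q.1 else r) r) PySem.Dict.empty,
         (PySem.List.enumerate segment).foldl
            (fun c p => (PySem.List.enumerate p.2.toList).foldl
              (fun c q => if q.2 == '#' then pvDAdd c q.1 p.1 else c) c) PySem.Dict.empty) := by
    rw [show (fun (st : PySem.Dict Int (PySem.Set Int) × PySem.Dict Int (PySem.Set Int))
          (p : Int × String) => (PySem.List.enumerate p.2.toList).foldl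
            (fun st q => if q.2 == '#' then (pvDAdd st.1 p.1 q.1, pvDAdd st.2 q.1 p.1) else st) st)
        = (fun st p =>
            ((PySem.List.enumerate p.2.toList).foldl
              (fun r q => if q.2 == '#' then pvDAdd r p.1 q.1 else r) st.1,
             (PySem.List.enumerate p.2.toList).foldl
              (fun c q => if q.2 == '#' then pvDAdd c q.1 p.1 else c) st.2))
      from funext fun st => funext fun p => split1 st p]
    exact pvFoldlProd (PySem.List.enumerate segment)
      (fun r p => (PySem.List.enumerate p.2.toList).foldl
        (fun r q => if q.2 == '#' then pvDAdd r p.1 q.1 else r) r)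
      (fun c p => (PySem.List.enumerate p.2.toList).foldl
        (fun c q => if q.2 == '#' then pvDAdd c q.1 p.1 else c) c)
      PySem.Dict.empty PySem.Dict.empty
  rw [split2]
  have hrows :
      (PySem.List.enumerate segment).foldl
        (fun r p => (PySem.List.enumerate p.2.toList).foldl
          (fun r q => if q.2 == '#' then pvDAdd r p.1 q.1 else r) r) PySem.Dict.empty
      = pts.foldl (fun d p => pvDAdd d p.1 p.2) PySem.Dict.empty := by
    rw [hpts, List.foldl_flatMap]
    apply List.foldl_ext
    intro d p _
    rw [pvFoldlIteFilterMap (PySem.List.enumerate p.2.toList) (fun q => q.2 == '#')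
      (fun q => q.1) (fun a x => pvDAdd a p.1 x) d, List.foldl_map, List.foldl_map]
  have hcols :
      (PySem.List.enumerate segment).foldl
        (fun c p => (PySem.List.enumerate p.2.toList).foldl
          (fun c q => if q.2 == '#' then pvDAdd c q.1 p.1 else c) c) PySem.Dict.empty
      = pts.foldl (fun d p => pvDAdd d p.2 p.1) PySem.Dict.empty := by
    rw [hpts, List.foldl_flatMap]
    apply List.foldl_ext
    intro d p _
    rw [pvFoldlIteFilterMap (PySem.List.enumerate p.2.toList) (fun q => q.2 == '#')
      (fun q => q.1) (fun a x => pvDAdd a x p.1) d, List.foldl_map, List.foldl_map]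
  have hswap : pts.foldl (fun d p => pvDAdd d p.2 p.1) PySem.Dict.empty
      = (pts.map Prod.swap).foldl (fun d p => pvDAdd d p.1 p.2) PySem.Dict.empty := by
    rw [List.foldl_map]
    rfl
  have hcolsBuild : pvBuild (pts.map Prod.swap)
      = (PySem.List.dedup (pts.map (·.2))).foldl
          (fun d x => d.insert x (PySem.Set.ofList ((pts.filter (fun p => p.2 == x)).map (·.1))))
          PySem.Dict.empty := by
    rw [pvBuild, List.map_map,
      show ((fun (p : Int × Int) => p.1) ∘ Prod.swap) = (fun (p : Int × Int) => p.2) from rfl]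
    apply List.foldl_ext
    intro d x _
    congr 1
    rw [List.filter_map, List.map_map]
    rfl
  rw [hrows, hcols, hswap, pvFoldEqBuild pts, pvFoldEqBuild (pts.map Prod.swap), hcolsBuild]
  rfl
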